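-- pv_equiv track=rewrite | github.com/KhaiXin30/INFO4940-AIDating | app.py | _strip_refinement_notes
-- ===== SOURCE A (Python) =====
-- def _strip_refinement_notes(text):
--     """Remove trailing 'What changed:', '*Updated:', and suggestion notes from a profile."""
--     lines = text.split("\n")
--     cut_index = len(lines)
--     for i, line in enumerate(lines):
--         stripped = line.strip().lower()
--         if (stripped.startswith("what changed:") or
--             stripped.startswith("*updated:") or
--             stripped.startswith("one thing that might") or
--             stripped.startswith("no further changes") or
--             stripped.startswith("*no further changes")):
--             cut_index = i
--             break
--     # Also strip trailing italic notes like "*Updated: ..."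
--     while cut_index > 0 and lines[cut_index - 1].strip().startswith("*"):
--         cut_index -= 1
--     return "\n".join(lines[:cut_index]).rstrip()
-- ===== SOURCE B (Python) =====
-- def _strip_refinement_notes(text):
--     """Remove trailing 'What changed:', '*Updated:', and suggestion notes from a profile."""
--     markers = ("what changed:", "*updated:", "one thing that might",
--                "no further changes", "*no further changes")
--     kept = []      # lines definitely part of the output
--     pending = []   # current consecutive run of '*'-prefixed lines, not yet committed
--     for line in text.split("\n"):
--         s = line.strip()
--         if s.lower().startswith(markers):
--             break
--         if s.startswith("*"):
--             pending.append(line)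
--         else:
--             kept.extend(pending)
--             pending = []
--             kept.append(line)
--     # a trailing (or pre-marker) asterisk run is dropped with the marker
--     return "\n".join(kept).rstrip()
-- ===== Notes on version B (the rewrite author's own statement) =====
-- stated objective: alternative
-- what changed: Instead of A's index arithmetic (find the first marker index, then walk a cut index backwards over the preceding asterisk run and slice), B builds the output lines directly in one pass with two accumulators: committed lines and the pending run of asterisk-prefixed lines, which is simply discarded at a marker or at end of input.
import Mathlib
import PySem

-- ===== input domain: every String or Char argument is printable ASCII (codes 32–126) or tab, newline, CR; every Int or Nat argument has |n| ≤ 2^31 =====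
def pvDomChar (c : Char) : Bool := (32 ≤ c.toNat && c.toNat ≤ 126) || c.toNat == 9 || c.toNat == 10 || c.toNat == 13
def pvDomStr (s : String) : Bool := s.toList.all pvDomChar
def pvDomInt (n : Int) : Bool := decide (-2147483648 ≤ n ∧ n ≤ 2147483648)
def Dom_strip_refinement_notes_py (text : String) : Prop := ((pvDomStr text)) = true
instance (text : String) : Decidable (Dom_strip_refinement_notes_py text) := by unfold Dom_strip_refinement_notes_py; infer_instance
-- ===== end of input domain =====

-- B replaces A's index arithmetic (first-marker index, then a backward walk of the cut index
-- over the preceding '*'-run, then a slice) by one pass accumulating the output lines directly: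
-- committed lines plus a pending asterisk run that a marker or end of input simply discards
-- (objective: alternative decomposition, same cost).

-- ===== PORT A =====
-- A's marker test: 'line.strip().lower().startswith(<m1>) or … or startswith(<m5>)'
def pvIsMarkerLine (line : String) : Bool :=
  let stripped := PySem.Str.lower (PySem.Str.strip line)
  PySem.Str.startswith stripped "what changed:" ||
  PySem.Str.startswith stripped "*updated:" ||
  PySem.Str.startswith stripped "one thing that might" ||
  PySem.Str.startswith stripped "no further changes" ||
  PySem.Str.startswith stripped "*no further changes"

-- A's 'for i, line in enumerate(lines): … break' loop: first marker index, if any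
def aFind : List String → Nat → Option Nat
  | [], _ => none
  | l :: rest, i => if pvIsMarkerLine l then some i else aFind rest (i + 1)

-- A's 'while cut_index > 0 and lines[cut_index-1].strip().startswith("*")' loop
def aBack (lines : List String) : Nat → Nat
  | 0 => 0
  | c + 1 =>
    if PySem.Str.startswith (PySem.Str.strip (lines.getD c "")) "*" then aBack lines c
    else c + 1

def strip_refinement_notes_py (text : String) : String :=
  let lines := (PySem.Str.split? text "\n").getD []   -- sep "\n" ≠ "": split? is always some
  let cut := aBack lines ((aFind lines 0).getD lines.length)
  PySem.Str.rstrip (PySem.Str.join "\n" (lines.take cut))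

-- ===== PORT B =====
-- B's marker tuple and 's.lower().startswith(markers)' (startswith with a tuple = any of them)
def bMarkers : List String :=
  ["what changed:", "*updated:", "one thing that might",
   "no further changes", "*no further changes"]

-- B's loop state: 'kept' (committed output lines) and 'pending' (current run of '*'-lines)
def bLoop : List String → List String → List String → List String
  | [], kept, _ => kept
  | line :: rest, kept, pending =>
    let s := PySem.Str.strip line
    if bMarkers.any (fun m => PySem.Str.startswith (PySem.Str.lower s) m) then kept
    else if PySem.Str.startswith s "*" then bLoop rest kept (pending ++ [line])
    else bLoop rest (kept ++ pending ++ [line]) []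

def strip_refinement_notes_py_alt (text : String) : String :=
  PySem.Str.rstrip
    (PySem.Str.join "\n" (bLoop ((PySem.Str.split? text "\n").getD []) [] []))

-- ===== PRECONDITION & SPEC =====
def Spec_strip_refinement_notes_py (text : String) (out : String) : Prop := out = strip_refinement_notes_py_alt text
instance (text : String) (out : String) : Decidable (Spec_strip_refinement_notes_py text out) := by unfold Spec_strip_refinement_notes_py; infer_instance

-- ===== CLAIM (what is proved, stated in full; the proofs are below) =====
def Claim_equal_strip_refinement_notes_py : Prop := ∀ (text : String), Dom_strip_refinement_notes_py text → Spec_strip_refinement_notes_py text (strip_refinement_notes_py text)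

-- ===== LEMMAS AND PROOFS =====

lemma bMarker_eq (line : String) :
    bMarkers.any (fun m => PySem.Str.startswith (PySem.Str.lower (PySem.Str.strip line)) m)
      = pvIsMarkerLine line := by
  unfold bMarkers pvIsMarkerLine
  simp only [List.any_cons, List.any_nil, Bool.or_false, Bool.or_assoc]

-- B's loop step, with the tuple-startswith test rewritten to A's marker predicate
lemma bLoop_cons (l : String) (rest kept pending : List String) :
    bLoop (l :: rest) kept pending
      = if pvIsMarkerLine l then kept
        else if PySem.Str.startswith (PySem.Str.strip l) "*" then
          bLoop rest kept (pending ++ [l])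
        else bLoop rest (kept ++ pending ++ [l]) [] := by
  conv_lhs => rw [bLoop]
  simp only [bMarker_eq]

lemma aFind_of_no_marker (pre : List String) (k : Nat)
    (h : ∀ l ∈ pre, pvIsMarkerLine l = false) : aFind pre k = none := by
  induction pre generalizing k with
  | nil => rfl
  | cons l rest ih =>
    have hl : pvIsMarkerLine l = false := h l (by simp)
    simp only [aFind, hl, Bool.false_eq_true, if_false]
    exact ih _ (fun x hx => h x (by simp [hx]))

lemma aFind_append (pre : List String) (l : String) (rest : List String) (k : Nat)
    (h : ∀ x ∈ pre, pvIsMarkerLine x = false) (hl : pvIsMarkerLine l = true) :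
    aFind (pre ++ l :: rest) k = some (k + pre.length) := by
  induction pre generalizing k with
  | nil => simp [aFind, hl]
  | cons p rest' ih =>
    have hp : pvIsMarkerLine p = false := h p (by simp)
    simp only [List.cons_append, aFind, hp, Bool.false_eq_true, if_false]
    rw [ih _ (fun x hx => h x (by simp [hx]))]
    exact congrArg some (by rw [List.length_cons]; omega)

-- the bridge: after a marker-free prefix 'pre = kept ++ pending' whose pending part is the
-- '*'-run A's back-walk would cross (aBack lands on kept.length), B's accumulators yield
-- exactly A's slice lines.take (A's cut)
lemma bLoop_eq_take (rest : List String) : ∀ (kept pending : List String),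
    (∀ l ∈ kept ++ pending, pvIsMarkerLine l = false) →
    aBack (kept ++ pending ++ rest) (kept ++ pending).length = kept.length →
    bLoop rest kept pending
      = (kept ++ pending ++ rest).take
          (aBack (kept ++ pending ++ rest)
            ((aFind (kept ++ pending ++ rest) 0).getD (kept ++ pending ++ rest).length)) := by
  induction rest with
  | nil =>
    intro kept pending hpre hrun
    rw [aFind_of_no_marker _ _ (by simpa using hpre)]
    simp only [Option.getD_none, List.append_nil] at *
    rw [hrun]
    simp [bLoop, List.take_append_of_le_length (le_refl kept.length)]
  | cons l rest ih =>
    intro kept pending hpre hrun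
    have hget : (kept ++ pending ++ l :: rest).getD (kept ++ pending).length "" = l := by
      simp [List.getD_eq_getElem?_getD, List.append_assoc]
    by_cases hm : pvIsMarkerLine l = true
    · have hfind : aFind (kept ++ pending ++ l :: rest) 0
          = some (kept ++ pending).length := by
        have := aFind_append (kept ++ pending) l rest 0 hpre hm
        simpa [List.append_assoc] using this
      rw [hfind]
      simp only [Option.getD_some]
      rw [hrun]
      rw [bLoop_cons, if_pos hm]
      simp [List.take_append_of_le_length (le_refl kept.length)]
    · have hm' : pvIsMarkerLine l = false := by simpa using hm
      by_cases hs : PySem.Str.startswith (PySem.Str.strip l) "*" = true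
      · -- '*'-line: pending grows
        have step : bLoop (l :: rest) kept pending = bLoop rest kept (pending ++ [l]) := by
          rw [bLoop_cons, if_neg (by simp [hm']), if_pos hs]
        rw [step]
        have hpre' : ∀ x ∈ kept ++ (pending ++ [l]), pvIsMarkerLine x = false := by
          intro x hx
          rcases List.mem_append.1 hx with h | h
          · exact hpre x (List.mem_append.2 (Or.inl h))
          · rcases List.mem_append.1 h with h | h
            · exact hpre x (List.mem_append.2 (Or.inr h))
            · simp at h; subst h; exact hm'
        have hback : aBack (kept ++ (pending ++ [l]) ++ rest)
            (kept ++ (pending ++ [l])).length = kept.length := by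
          have hlen : (kept ++ (pending ++ [l])).length = (kept ++ pending).length + 1 := by
            simp only [List.length_append, List.length_cons, List.length_nil]; omega
          rw [hlen]
          have h1 : aBack (kept ++ (pending ++ [l]) ++ rest) ((kept ++ pending).length + 1)
              = if PySem.Str.startswith
                    (PySem.Str.strip
                      ((kept ++ (pending ++ [l]) ++ rest).getD (kept ++ pending).length "")) "*"
                then aBack (kept ++ (pending ++ [l]) ++ rest) (kept ++ pending).length
                else (kept ++ pending).length + 1 := rfl
          have hget' : (kept ++ (pending ++ [l]) ++ rest).getD (kept ++ pending).length "" = l := by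
            simp [List.getD_eq_getElem?_getD, List.append_assoc]
          have hassoc : kept ++ (pending ++ [l]) ++ rest = kept ++ pending ++ l :: rest := by
            simp
          rw [h1, hget', if_pos hs, hassoc, hrun]
        have := ih kept (pending ++ [l]) hpre' hback
        have hassoc : kept ++ (pending ++ [l]) ++ rest = kept ++ pending ++ l :: rest := by
          simp
        rw [hassoc] at this
        exact this
      · -- ordinary line: pending is committed
        have step : bLoop (l :: rest) kept pending
            = bLoop rest (kept ++ pending ++ [l]) [] := by
          rw [bLoop_cons, if_neg (by simp [hm']), if_neg hs]
        rw [step]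
        have hpre' : ∀ x ∈ (kept ++ pending ++ [l]) ++ ([] : List String),
            pvIsMarkerLine x = false := by
          intro x hx
          simp only [List.append_nil] at hx
          rcases List.mem_append.1 hx with h | h
          · exact hpre x h
          · simp at h; subst h; exact hm'
        have hback : aBack ((kept ++ pending ++ [l]) ++ ([] : List String) ++ rest)
            ((kept ++ pending ++ [l]) ++ ([] : List String)).length
            = (kept ++ pending ++ [l]).length := by
          have hlen : ((kept ++ pending ++ [l]) ++ ([] : List String)).length
              = (kept ++ pending).length + 1 := by
            simp only [List.length_append, List.length_cons, List.length_nil]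
          rw [hlen]
          have h1 : aBack ((kept ++ pending ++ [l]) ++ ([] : List String) ++ rest)
              ((kept ++ pending).length + 1)
              = if PySem.Str.startswith
                    (PySem.Str.strip
                      (((kept ++ pending ++ [l]) ++ ([] : List String) ++ rest).getD
                        (kept ++ pending).length "")) "*"
                then aBack ((kept ++ pending ++ [l]) ++ ([] : List String) ++ rest)
                      (kept ++ pending).length
                else (kept ++ pending).length + 1 := rfl
          have hget' : ((kept ++ pending ++ [l]) ++ ([] : List String) ++ rest).getD
              (kept ++ pending).length "" = l := by
            simp [List.getD_eq_getElem?_getD, List.append_assoc]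
          rw [h1, hget', if_neg hs]
          simp only [List.length_append, List.length_cons, List.length_nil]
        have := ih (kept ++ pending ++ [l]) [] hpre' hback
        have hassoc : (kept ++ pending ++ [l]) ++ ([] : List String) ++ rest
            = kept ++ pending ++ l :: rest := by simp
        rw [hassoc] at this
        exact this

lemma bLoop_eq (lines : List String) :
    bLoop lines [] []
      = lines.take (aBack lines ((aFind lines 0).getD lines.length)) := by
  have := bLoop_eq_take lines [] [] (by simp) (by simp [aBack])
  simpa using this

-- ===== VERDICT (by name: the statement is the Claim_ definition above) =====
theorem strip_refinement_notes_py_spec : Claim_equal_strip_refinement_notes_py := by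
  intro text _
  unfold Spec_strip_refinement_notes_py strip_refinement_notes_py strip_refinement_notes_py_alt
  simp only [bLoop_eq]
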